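-- pv_equiv track=rewrite | github.com/koala-man-64/asset-allocation-control-plane | scripts/automation/render_control_plane_manifest.py | _remove_exact_block
-- ===== SOURCE A (Python) =====
-- from typing import Iterable
--
-- def _remove_exact_block(lines: list[str], block: Iterable[str]) -> list[str]:
--     block_lines = list(block)
--     block_size = len(block_lines)
--     rendered: list[str] = []
--     index = 0
--
--     while index < len(lines):
--         if lines[index : index + block_size] == block_lines:
--             index += block_size
--             continue
--         rendered.append(lines[index])
--         index += 1
--
--     return rendered
-- ===== SOURCE B (Python) =====
-- def _remove_exact_block(lines, block):
--     block_lines = list(block)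
--     n = len(block_lines)
--     rendered = []
--     rest = list(lines)
--     while rest:
--         if n and rest[:n] == block_lines:
--             rest = rest[n:]
--         else:
--             rendered.append(rest[0])
--             rest = rest[1:]
--     return rendered
-- ===== Notes on version B (the rewrite author's own statement) =====
-- stated objective: alternative
-- what changed: B rewrites the suffix of the input itself (drop the block when it is a prefix of the remaining suffix, else move one element to the output), replacing A's index arithmetic with per-position slice windows; it also terminates on an empty block, where A spins forever.
-- outside the precondition, e.g. on _remove_exact_block(['a'], []): A does not finish within the time limit, B returns ['a']
import Mathlib
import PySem

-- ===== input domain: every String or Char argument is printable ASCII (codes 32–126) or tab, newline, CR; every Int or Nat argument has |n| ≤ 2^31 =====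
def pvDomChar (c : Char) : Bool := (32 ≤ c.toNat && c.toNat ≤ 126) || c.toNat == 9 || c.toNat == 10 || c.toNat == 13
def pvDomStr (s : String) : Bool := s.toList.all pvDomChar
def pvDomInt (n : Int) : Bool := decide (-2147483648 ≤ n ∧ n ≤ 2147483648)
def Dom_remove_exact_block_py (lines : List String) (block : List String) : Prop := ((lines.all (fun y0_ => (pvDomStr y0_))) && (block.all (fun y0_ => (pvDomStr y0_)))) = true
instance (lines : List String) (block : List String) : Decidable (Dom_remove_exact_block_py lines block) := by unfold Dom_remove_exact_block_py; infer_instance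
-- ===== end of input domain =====

-- B rewrites the remaining suffix of the list itself instead of scanning with index arithmetic
-- and slice windows; same values; B also terminates on an empty block, where A loops forever.

-- ===== PORT A =====
-- A's while loop over `index`, made total with fuel (lines.length suffices whenever the
-- Python loop terminates, since every iteration then advances `index` by at least 1).
def goA_remove (lines block_lines : List String) (block_size : Nat) :
    Nat → Nat → List String → List String
  | 0, _, rendered => rendered
  | fuel + 1, index, rendered =>
    if index < lines.length then
      if PySem.List.slice lines (some (index : Int)) (some ((index : Int) + (block_size : Int))) = block_lines then
        goA_remove lines block_lines block_size fuel (index + block_size) rendered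
      else
        goA_remove lines block_lines block_size fuel (index + 1) (rendered ++ [lines.getD index ""])
    else rendered

def remove_exact_block_py (lines : List String) (block : List String) : List String :=
  goA_remove lines block block.length lines.length 0 []

-- ===== PORT B =====
-- Source B's while loop over the shrinking suffix `rest`, with accumulator `rendered`.
def goB_remove (block_lines : List String) (n : Nat) :
    List String → List String → List String
  | [], rendered => rendered
  | x :: rs, rendered =>
    if _h : n ≠ 0 ∧ (x :: rs).take n = block_lines then
      goB_remove block_lines n ((x :: rs).drop n) rendered
    else
      goB_remove block_lines n rs (rendered ++ [x])
  termination_by rest _ => rest.length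
  decreasing_by
    · simp only [List.length_drop, List.length_cons]; omega
    · simp

def remove_exact_block_py_alt (lines : List String) (block : List String) : List String :=
  goB_remove block block.length lines []

-- ===== PRECONDITION & SPEC =====
-- Pre_ excludes exactly the inputs (nonempty lines with an empty block) on which Python A
-- never returns: its matched branch then advances index by 0 and the while loop spins forever.
def Pre_remove_exact_block_py (lines : List String) (block : List String) : Prop :=
  block ≠ [] ∨ lines = []
instance (lines : List String) (block : List String) : Decidable (Pre_remove_exact_block_py lines block) := by unfold Pre_remove_exact_block_py; infer_instance

def pvWitness_remove_exact_block_py : List String × List String := (["a", "b", "a"], ["b"])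

def Spec_remove_exact_block_py (lines : List String) (block : List String) (out : List String) : Prop := out = remove_exact_block_py_alt lines block
instance (lines : List String) (block : List String) (out : List String) : Decidable (Spec_remove_exact_block_py lines block out) := by unfold Spec_remove_exact_block_py; infer_instance

-- ===== CLAIM (what is proved, stated in full; the proofs are below) =====
def Claim_equal_remove_exact_block_py : Prop := ∀ (lines : List String) (block : List String), Dom_remove_exact_block_py lines block → Pre_remove_exact_block_py lines block → Spec_remove_exact_block_py lines block (remove_exact_block_py lines block)

-- ===== LEMMAS AND PROOFS =====

lemma goA_eq_goB (lines block : List String) (hb : block ≠ []) :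
    ∀ (fuel i : Nat) (acc : List String), lines.length ≤ i + fuel →
      goA_remove lines block block.length fuel i acc
        = goB_remove block block.length (lines.drop i) acc := by
  intro fuel
  induction fuel with
  | zero =>
    intro i acc hf
    have : lines.drop i = [] := List.drop_eq_nil_of_le (by omega)
    simp [goA_remove, this, goB_remove]
  | succ fuel ih =>
    intro i acc hf
    by_cases hi : i < lines.length
    · have hdrop : lines.drop i = lines[i] :: lines.drop (i + 1) :=
        List.drop_eq_getElem_cons hi
      have hslice : PySem.List.slice lines (some (i : Int)) (some ((i : Int) + (block.length : Int)))
          = (lines.drop i).take block.length := by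
        simpa using PySem.List.slice_natCast_add lines i block.length
      by_cases hm : (lines.drop i).take block.length = block
      · have hbs : 1 ≤ block.length := by
          cases block with
          | nil => exact absurd rfl hb
          | cons a l => simp
        rw [goA_remove, if_pos hi, if_pos (by rw [hslice]; exact hm)]
        rw [hdrop, goB_remove, dif_pos ⟨by omega, by rw [← hdrop]; exact hm⟩]
        rw [← hdrop, List.drop_drop]
        exact ih (i + block.length) acc (by omega)
      · rw [goA_remove, if_pos hi, if_neg (by rw [hslice]; exact hm)]
        rw [hdrop, goB_remove, dif_neg (by rw [← hdrop]; rintro ⟨-, h⟩; exact hm h)]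
        rw [List.getD_eq_getElem lines "" hi]
        exact ih (i + 1) _ (by omega)
    · have : lines.drop i = [] := List.drop_eq_nil_of_le (by omega)
      simp [goA_remove, hi, this, goB_remove]

-- ===== VERDICT (by name: the statement is the Claim_ definition above) =====
theorem remove_exact_block_py_spec : Claim_equal_remove_exact_block_py := by
  intro lines block _dom hpre
  unfold Spec_remove_exact_block_py remove_exact_block_py remove_exact_block_py_alt
  rcases hpre with hb | hl
  · simpa using goA_eq_goB lines block hb lines.length 0 [] (by omega)
  · subst hl
    simp [goA_remove, goB_remove]
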